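-- pv_equiv track=rewrite | github.com/MokahalA/ITI1120 | Lab 6 Work/Lab6Ex4.py | sum_5_consecutive_for
-- ===== SOURCE A (Python) =====
-- def sum_5_consecutive_for(lst):       #For loop
--
--     if (len(lst)<5):
--         return False
--
--     total = 0
--
--     for i in range(0,len(lst)):
--         total= 0
--         for j in range(i,i+5):
--             if(j >= len(lst)):
--                 return False
--             total = total + lst[j]
--
--         if (total==0):
--             return True
--
--     return False
-- ===== SOURCE B (Python) =====
-- def sum_5_consecutive_for(lst):
--     # prefix-sum table: P[k] = sum of lst[:k]
--     P = [0]
--     for x in lst: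
--         P.append(P[-1] + x)
--     for i in range(len(lst) - 4):
--         if P[i + 5] - P[i] == 0:
--             return True
--     return False
-- ===== Notes on version B (the rewrite author's own statement) =====
-- stated objective: faster
-- what changed: Replaces the nested loop that re-sums each 5-element window (with an early in-loop bounds return) by a prefix-sum table built in one pass plus a second pass comparing P[i+5]-P[i] to zero.
import Mathlib
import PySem

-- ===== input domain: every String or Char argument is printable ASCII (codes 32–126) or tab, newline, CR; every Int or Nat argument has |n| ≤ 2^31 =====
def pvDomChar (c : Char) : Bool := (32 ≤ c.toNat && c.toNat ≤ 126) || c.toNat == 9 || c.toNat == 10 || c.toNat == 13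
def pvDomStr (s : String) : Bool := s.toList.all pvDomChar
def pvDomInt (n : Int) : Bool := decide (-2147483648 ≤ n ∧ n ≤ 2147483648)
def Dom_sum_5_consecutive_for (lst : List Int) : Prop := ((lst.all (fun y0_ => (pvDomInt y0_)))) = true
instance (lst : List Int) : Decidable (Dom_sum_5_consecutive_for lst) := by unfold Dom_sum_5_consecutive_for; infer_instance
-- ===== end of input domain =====

-- B replaces A's nested re-summing loops by a prefix-sum table and a second lookup pass (alternative algorithm, same cost class).


-- ===== PORT A =====
-- inner 'for j in range(i, i+5)' loop: k iterations left; 'none' = the early 'return False'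
def sum5Inner (lst : List Int) : Nat → Nat → Int → Option Int
  | _, 0, total => some total
  | j, k+1, total =>
    if j ≥ lst.length then none
    else sum5Inner lst (j+1) k (total + lst.getD j 0)  -- lst[j]: exact, j < len here

-- outer 'for i in range(0, len(lst))' loop with its two early returns
def sum5Outer (lst : List Int) (i : Nat) : Bool :=
  if _h : i < lst.length then
    match sum5Inner lst i 5 0 with
    | none => false
    | some total => if total = 0 then true else sum5Outer lst (i+1)
  else false
termination_by lst.length - i

def sum_5_consecutive_for (lst : List Int) : Bool :=
  if lst.length < 5 then false
  else sum5Outer lst 0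

-- ===== PORT B =====
-- 'P = [0]; for x in lst: P.append(P[-1] + x)'
def pvBuildP (P : List Int) : List Int → List Int
  | [] => P
  | x :: xs => pvBuildP (P ++ [P.getLastD 0 + x]) xs  -- P[-1]: exact, P never empty

def sum_5_consecutive_for_alt (lst : List Int) : Bool :=
  let P := pvBuildP [0] lst
  (List.range (lst.length - 4)).any (fun i => P.getD (i+5) 0 - P.getD i 0 == 0)
  -- P[i+5], P[i]: exact, both indices < len(P) for i in range

-- ===== PRECONDITION & SPEC =====
def Spec_sum_5_consecutive_for (lst : List Int) (out : Bool) : Prop := out = sum_5_consecutive_for_alt lst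
instance (lst : List Int) (out : Bool) : Decidable (Spec_sum_5_consecutive_for lst out) := by unfold Spec_sum_5_consecutive_for; infer_instance

-- ===== CLAIM (what is proved, stated in full; the proofs are below) =====
def Claim_equal_sum_5_consecutive_for : Prop := ∀ (lst : List Int), Dom_sum_5_consecutive_for lst → Spec_sum_5_consecutive_for lst (sum_5_consecutive_for lst)

-- ===== LEMMAS AND PROOFS =====

-- sum of the (at most) 5-element window starting at i
def winSum (lst : List Int) (i : Nat) : Int := ((lst.drop i).take 5).sum

-- pure running prefix sums starting from s
def presums (s : Int) : List Int → List Int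
  | [] => []
  | x :: xs => (s + x) :: presums (s + x) xs

theorem pvBuildP_eq : ∀ (xs P : List Int), pvBuildP P xs = P ++ presums (P.getLastD 0) xs
  | [], P => by simp [pvBuildP, presums]
  | x :: xs, P => by
    rw [pvBuildP, pvBuildP_eq xs]
    simp [presums]

theorem presums_getD : ∀ (xs : List Int) (s : Int) (k : Nat), k ≤ xs.length →
    (s :: presums s xs).getD k 0 = s + (xs.take k).sum
  | xs, s, 0, _ => by simp
  | [], _, k+1, h => by simp at h
  | x :: xs, s, k+1, h => by
    have ih := presums_getD xs (s + x) k (by simpa using h)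
    rw [show presums s (x :: xs) = (s + x) :: presums (s + x) xs from rfl,
      List.getD_cons_succ, ih, List.take_succ_cons, List.sum_cons]
    ring

theorem inner_eq (lst : List Int) : ∀ (k j : Nat) (t : Int), j ≤ lst.length →
    sum5Inner lst j k t =
      if j + k ≤ lst.length then some (t + ((lst.drop j).take k).sum) else none
  | 0, j, t, hle => by simp [sum5Inner]; omega
  | k+1, j, t, hle => by
    rw [sum5Inner]
    split
    · have : ¬ (j + (k+1) ≤ lst.length) := by omega
      simp [this]
    · have hj : j < lst.length := by omega
      rw [inner_eq lst k (j+1) (t + lst.getD j 0) (by omega)]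
      have hdrop : lst.drop j = lst[j] :: lst.drop (j+1) := List.drop_eq_getElem_cons hj
      by_cases hle : j + 1 + k ≤ lst.length
      · have : j + (k+1) ≤ lst.length := by omega
        simp only [hle, if_pos, this, hdrop, List.take_succ_cons, List.sum_cons,
          List.getD_eq_getElem _ _ hj]
        congr 1
        ring
      · have : ¬ (j + (k+1) ≤ lst.length) := by omega
        simp [hle, this]

theorem outer_iff (lst : List Int) : ∀ (n i : Nat), n = lst.length - i →
    (sum5Outer lst i = true ↔ ∃ m, i ≤ m ∧ m + 5 ≤ lst.length ∧ winSum lst m = 0)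
  | 0, i, hn => by
    rw [sum5Outer]
    have : ¬ i < lst.length := by omega
    simp only [this, dif_neg, not_false_iff]
    constructor
    · intro h; exact absurd h (by simp)
    · rintro ⟨m, h1, h2, _⟩; omega
  | n+1, i, hn => by
    rw [sum5Outer]
    by_cases hi : i < lst.length
    · simp only [hi, dif_pos]
      rw [inner_eq lst 5 i 0 (le_of_lt hi)]
      by_cases h5 : i + 5 ≤ lst.length
      · simp only [h5, if_pos]
        have hIH := outer_iff lst n (i+1) (by omega)
        by_cases hz : (0 : Int) + ((lst.drop i).take 5).sum = 0
        · simp only [hz, if_pos]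
          constructor
          · intro _; exact ⟨i, le_refl i, h5, by simpa [winSum] using hz⟩
          · intro _; trivial
        · simp only [hz, if_neg, not_false_iff]
          rw [hIH]
          constructor
          · rintro ⟨m, h1, h2, h3⟩; exact ⟨m, by omega, h2, h3⟩
          · rintro ⟨m, h1, h2, h3⟩
            refine ⟨m, by_contra fun hc => ?_, h2, h3⟩
            have : m = i := by omega
            exact hz (by simpa [winSum, this] using h3)
      · simp only [h5, if_neg, not_false_iff]
        constructor
        · intro h; exact absurd h (by simp)
        · rintro ⟨m, h1, h2, _⟩; omega
    · simp only [hi, dif_neg, not_false_iff]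
      constructor
      · intro h; exact absurd h (by simp)
      · rintro ⟨m, h1, h2, _⟩; omega

theorem alt_iff (lst : List Int) :
    sum_5_consecutive_for_alt lst = true ↔ ∃ m, m + 5 ≤ lst.length ∧ winSum lst m = 0 := by
  unfold sum_5_consecutive_for_alt
  have hP : pvBuildP [0] lst = 0 :: presums 0 lst := by rw [pvBuildP_eq]; rfl
  rw [hP]
  simp only [List.any_eq_true, List.mem_range, beq_iff_eq]
  constructor
  · rintro ⟨i, hi, hz⟩
    have h5 : i + 5 ≤ lst.length := by omega
    rw [presums_getD lst 0 (i+5) h5, presums_getD lst 0 i (by omega)] at hz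
    refine ⟨i, h5, ?_⟩
    have htk : lst.take (i+5) = lst.take i ++ (lst.drop i).take 5 := by
      rw [List.take_add]
    unfold winSum
    rw [htk, List.sum_append] at hz
    omega
  · rintro ⟨m, hm, hz⟩
    refine ⟨m, by omega, ?_⟩
    rw [presums_getD lst 0 (m+5) hm, presums_getD lst 0 m (by omega)]
    have htk : lst.take (m+5) = lst.take m ++ (lst.drop m).take 5 := by
      rw [List.take_add]
    unfold winSum at hz
    rw [htk, List.sum_append]
    omega

-- ===== VERDICT (by name: the statement is the Claim_ definition above) =====
theorem sum_5_consecutive_for_spec : Claim_equal_sum_5_consecutive_for := by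
  intro lst _
  unfold Spec_sum_5_consecutive_for sum_5_consecutive_for
  by_cases hlen : lst.length < 5
  · have hB : ¬ sum_5_consecutive_for_alt lst = true := by
      rw [alt_iff]; rintro ⟨m, hm, _⟩; omega
    simp only [hlen, if_pos]
    exact ((Bool.not_eq_true _).mp hB).symm
  · simp only [hlen, if_neg, not_false_iff]
    have hA := outer_iff lst (lst.length - 0) 0 rfl
    have hB := alt_iff lst
    by_cases hb : sum5Outer lst 0 = true
    · rw [hb]
      obtain ⟨m, _, h2, h3⟩ := hA.mp hb
      exact (hB.mpr ⟨m, h2, h3⟩).symm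
    · have hb' : sum5Outer lst 0 = false := by simpa using hb
      rw [hb']
      symm
      rw [Bool.eq_false_iff]
      intro hc
      obtain ⟨m, h2, h3⟩ := hB.mp hc
      exact hb (hA.mpr ⟨m, Nat.zero_le m, h2, h3⟩)
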